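-- pv_equiv track=rewrite | github.com/univention/univention-corporate-server | packaging/ucslint/univention/ucslint/base.py | _split_field
-- ===== SOURCE A (Python) =====
-- from typing import Any, Callable, Dict, Iterable, Iterator, List, Mapping, Match, Optional, Pattern, Set, Tuple  # noqa: F401
--
-- def _split_field(s: str) -> Iterator[str]:
-- 	"""Split control field into parts. Returns generator."""
-- 	for con in s.split(','):
-- 		con = con.strip()
-- 		for dis in con.split('|'):
-- 			i = dis.find('(')
-- 			if i >= 0:
-- 				dis = dis[:i]
--
-- 			pkg = dis.strip()
-- 			if pkg:
-- 				yield pkg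
-- ===== SOURCE B (Python) =====
-- from typing import Iterator
--
--
-- def _split_field(s: str) -> Iterator[str]:
-- 	"""Split control field into parts. Returns generator.
--
-- 	Single character-level pass: ',' and '|' both just end the current
-- 	token, and a '(' makes the rest of the token ignored.
-- 	"""
-- 	buf = []
-- 	skip = False
-- 	for ch in s:
-- 		if ch == ',' or ch == '|':
-- 			pkg = ''.join(buf).strip()
-- 			if pkg:
-- 				yield pkg
-- 			buf = []
-- 			skip = False
-- 		elif ch == '(':
-- 			skip = True
-- 		elif not skip:
-- 			buf.append(ch)
-- 	pkg = ''.join(buf).strip()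
-- 	if pkg:
-- 		yield pkg
-- ===== Notes on version B (the rewrite author's own statement) =====
-- stated objective: alternative
-- what changed: A's nested split-on-comma then split-on-pipe loops (with an intermediate strip and a find/slice truncation) are replaced by a single character-level pass that treats comma and pipe uniformly as token separators and drops the rest of a token after an opening parenthesis via a flag.
import Mathlib
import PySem

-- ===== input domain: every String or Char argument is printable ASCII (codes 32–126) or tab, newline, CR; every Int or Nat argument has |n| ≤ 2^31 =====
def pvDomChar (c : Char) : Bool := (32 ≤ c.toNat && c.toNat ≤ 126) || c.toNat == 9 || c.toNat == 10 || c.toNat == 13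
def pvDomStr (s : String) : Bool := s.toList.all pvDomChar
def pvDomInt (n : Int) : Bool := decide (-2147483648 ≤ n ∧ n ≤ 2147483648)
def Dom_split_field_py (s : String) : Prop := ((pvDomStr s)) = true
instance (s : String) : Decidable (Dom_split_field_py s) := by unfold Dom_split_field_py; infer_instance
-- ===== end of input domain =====

-- B replaces A's nested comma-split/pipe-split loops by a single character-level pass
-- over the string (objective: alternative decomposition; same asymptotic cost).

-- ===== PORT A =====
def split_field_py (s : String) : List String :=
  ((PySem.Str.split? s ",").getD []).foldl (fun acc con =>
    let con := PySem.Str.strip con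
    ((PySem.Str.split? con "|").getD []).foldl (fun acc dis =>
      let i := PySem.Str.find dis "("
      let dis := if 0 ≤ i then PySem.Str.slice dis none (some i) else dis
      let pkg := PySem.Str.strip dis
      if pkg ≠ "" then acc ++ [pkg] else acc) acc) []

-- ===== PORT B =====
-- transliteration of Source B: one pass over the characters, `buf` the kept chars of
-- the current token, `skip` set once a '(' was seen in the token.
def splitFieldGo : List Char → List Char → Bool → List String → List String
  | [], buf, _, out =>
      let pkg := PySem.Chars.strip buf
      if pkg ≠ [] then out ++ [String.ofList pkg] else out
  | c :: cs, buf, skip, out =>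
      if c = ',' ∨ c = '|' then
        let pkg := PySem.Chars.strip buf
        splitFieldGo cs [] false (if pkg ≠ [] then out ++ [String.ofList pkg] else out)
      else if c = '(' then splitFieldGo cs buf true out
      else if !skip then splitFieldGo cs (buf ++ [c]) skip out
      else splitFieldGo cs buf skip out

def split_field_py_alt (s : String) : List String := splitFieldGo s.toList [] false []

-- ===== PRECONDITION & SPEC =====
def Spec_split_field_py (s : String) (out : List String) : Prop := out = split_field_py_alt s
instance (s : String) (out : List String) : Decidable (Spec_split_field_py s out) := by unfold Spec_split_field_py; infer_instance

-- ===== CLAIM (what is proved, stated in full; the proofs are below) =====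
def Claim_equal_split_field_py : Prop := ∀ (s : String), Dom_split_field_py s → Spec_split_field_py s (split_field_py s)

-- ===== LEMMAS AND PROOFS =====
def splitP (p : Char → Bool) : List Char → List (List Char)
  | [] => [[]]
  | c :: cs => if p c then [] :: splitP p cs else (splitP p cs).modifyHead (c :: ·)

theorem splitP_ne_nil (p : Char → Bool) (cs : List Char) : splitP p cs ≠ [] := by
  induction cs with
  | nil => simp [splitP]
  | cons c cs ih =>
    simp only [splitP]
    split
    · simp
    · cases h : splitP p cs with
      | nil => exact absurd h ih
      | cons a t => simp [List.modifyHead]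

theorem splitP_flatten (q r : Char → Bool) (cs : List Char) :
    (splitP q cs).flatMap (splitP r) = splitP (fun c => q c || r c) cs := by
  induction cs with
  | nil => simp [splitP]
  | cons c cs ih =>
    by_cases hq : q c
    · simp [splitP, hq, ← ih]
    · obtain ⟨h, t, hs⟩ : ∃ h t, splitP q cs = h :: t := by
        cases hh : splitP q cs with
        | nil => exact absurd hh (splitP_ne_nil q cs)
        | cons a t => exact ⟨a, t, rfl⟩
      by_cases hr : r c
      · simp [splitP, hq, hr, hs, ← ih]
      · simp only [splitP, hq, hr, Bool.false_or, if_neg, hs, Bool.not_eq_true]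
        simp only [List.modifyHead, List.flatMap_cons, splitP, hr, if_neg, Bool.not_eq_true]
        rw [← ih, hs]
        cases hh : splitP r h with
        | nil => exact absurd hh (splitP_ne_nil r h)
        | cons a u => simp [hh]

def mLast (f : List Char → List Char) : List (List Char) → List (List Char)
  | [] => []
  | [a] => [f a]
  | a :: b :: rest => a :: mLast f (b :: rest)

theorem splitP_ws_left (q : Char → Bool) (ws l : List Char) (h : ws.all (fun c => !q c)) :
    splitP q (ws ++ l) = (splitP q l).modifyHead (ws ++ ·) := by
  induction ws with
  | nil =>
    cases hh : splitP q l with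
    | nil => exact absurd hh (splitP_ne_nil q l)
    | cons a t => simp [hh]
  | cons w ws ih =>
    simp only [List.all_cons, Bool.and_eq_true, Bool.not_eq_true'] at h
    simp only [List.cons_append, splitP, h.1, if_neg, Bool.false_eq_true, not_false_iff,
      ih h.2]
    cases hh : splitP q l with
    | nil => exact absurd hh (splitP_ne_nil q l)
    | cons a t => simp

theorem splitP_ws_right (q : Char → Bool) (l ws : List Char) (h : ws.all (fun c => !q c)) :
    splitP q (l ++ ws) = mLast (· ++ ws) (splitP q l) := by
  induction l with
  | nil =>
    simp only [List.nil_append, splitP, mLast]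
    rw [show ws = ws ++ [] by simp, splitP_ws_left q ws [] h]
    simp [splitP]
  | cons c l ih =>
    by_cases hq : q c
    · simp only [List.cons_append, splitP, hq, if_pos, ih]
      obtain ⟨a, t, hs⟩ : ∃ a t, splitP q l = a :: t := by
        cases hh : splitP q l with
        | nil => exact absurd hh (splitP_ne_nil q l)
        | cons a t => exact ⟨a, t, rfl⟩
      rw [hs]
      cases t <;> simp [mLast]
    · simp only [List.cons_append, splitP, hq, if_neg, Bool.not_eq_true, ih]
      obtain ⟨a, t, hs⟩ : ∃ a t, splitP q l = a :: t := by
        cases hh : splitP q l with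
        | nil => exact absurd hh (splitP_ne_nil q l)
        | cons a t => exact ⟨a, t, rfl⟩
      rw [hs]
      cases t <;> simp [mLast]

theorem isspace_toNat (c : Char) (h : PySem.Chars.isspace c = true) :
    c.toNat ≠ 40 ∧ c.toNat ≠ 44 ∧ c.toNat ≠ 124 := by
  unfold PySem.Chars.isspace at h
  simp only [Bool.or_eq_true, Bool.and_eq_true, decide_eq_true_eq] at h
  omega

theorem isspace_ne_paren (c : Char) (h : PySem.Chars.isspace c = true) : (c != '(') = true := by
  simp only [bne_iff_ne, ne_eq]
  intro rfl_eq; exact (isspace_toNat c h).1 (by rw [rfl_eq]; rfl)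

theorem isspace_not_pipe (c : Char) (h : PySem.Chars.isspace c = true) : (c == '|') = false := by
  simp only [beq_eq_false_iff_ne, ne_eq]
  intro rfl_eq; exact (isspace_toNat c h).2.2 (by rw [rfl_eq]; rfl)

theorem dropWhile_ws (ws : List Char) (h : ws.all PySem.Chars.isspace) :
    List.dropWhile PySem.Chars.isspace ws = [] := by
  rw [List.dropWhile_eq_nil_iff]
  intro x hx; exact (List.all_eq_true.mp h) x hx

theorem takeWhile_ws_paren (ws : List Char) (h : ws.all PySem.Chars.isspace) :
    List.takeWhile (· != '(') ws = ws := by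
  rw [List.takeWhile_eq_self_iff]
  intro x hx; exact isspace_ne_paren x ((List.all_eq_true.mp h) x hx)

theorem strip_ws_left (ws x : List Char) (h : ws.all PySem.Chars.isspace) :
    PySem.Chars.strip (ws ++ x) = PySem.Chars.strip x := by
  unfold PySem.Chars.strip PySem.Chars.lstrip
  rw [List.dropWhile_append, dropWhile_ws ws h]
  simp

theorem rstrip_ws_right (x ws : List Char) (h : ws.all PySem.Chars.isspace) :
    PySem.Chars.rstrip (x ++ ws) = PySem.Chars.rstrip x := by
  unfold PySem.Chars.rstrip
  rw [List.reverse_append, List.dropWhile_append, dropWhile_ws _ (by simpa using h)]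
  simp

theorem strip_ws_right (x ws : List Char) (h : ws.all PySem.Chars.isspace) :
    PySem.Chars.strip (x ++ ws) = PySem.Chars.strip x := by
  unfold PySem.Chars.strip PySem.Chars.lstrip
  rw [List.dropWhile_append]
  by_cases hx : List.dropWhile PySem.Chars.isspace x = []
  · simp [hx, dropWhile_ws ws h, PySem.Chars.rstrip]
  · rw [if_neg (by simpa using hx)]
    exact rstrip_ws_right _ ws h

def emitTok (t : List Char) : List String :=
  if PySem.Chars.strip t ≠ [] then [String.ofList (PySem.Chars.strip t)] else []

def procTok (t : List Char) : List String := emitTok (t.takeWhile (· != '('))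

theorem procTok_ws_left (ws h : List Char) (hw : ws.all PySem.Chars.isspace) :
    procTok (ws ++ h) = procTok h := by
  unfold procTok
  rw [List.takeWhile_append, takeWhile_ws_paren ws hw, if_pos rfl]
  unfold emitTok
  rw [strip_ws_left ws _ hw]

theorem procTok_ws_right (h ws : List Char) (hw : ws.all PySem.Chars.isspace) :
    procTok (h ++ ws) = procTok h := by
  unfold procTok
  rw [List.takeWhile_append]
  by_cases hh : (List.takeWhile (· != '(') h).length = h.length
  · rw [if_pos hh, takeWhile_ws_paren ws hw]
    unfold emitTok
    rw [strip_ws_right _ ws hw, List.takeWhile_eq_self_iff.mpr]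
    intro x hx
    have := List.takeWhile_eq_self_iff.mp ((List.takeWhile_sublist _).eq_of_length hh)
    exact this x hx
  · rw [if_neg hh]

theorem flatMap_modifyHead_ws (ws : List Char) (hw : ws.all PySem.Chars.isspace)
    (l : List (List Char)) :
    (l.modifyHead (ws ++ ·)).flatMap procTok = l.flatMap procTok := by
  cases l with
  | nil => rfl
  | cons a t => simp [procTok_ws_left _ _ hw]

theorem flatMap_mLast_ws (ws : List Char) (hw : ws.all PySem.Chars.isspace)
    (l : List (List Char)) :
    (mLast (· ++ ws) l).flatMap procTok = l.flatMap procTok := by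
  induction l with
  | nil => rfl
  | cons a t ih =>
    cases t with
    | nil => simp [mLast, procTok_ws_right _ _ hw]
    | cons b u => simp only [mLast, List.flatMap_cons, ih]

theorem all_takeWhile_isspace (l : List Char) :
    (List.takeWhile PySem.Chars.isspace l).all PySem.Chars.isspace := by
  rw [List.all_eq_true]; intro x hx; exact List.mem_takeWhile_imp hx

theorem ws_not_pipe (ws : List Char) (h : ws.all PySem.Chars.isspace) :
    ws.all (fun c => !(c == '|')) := by
  rw [List.all_eq_true] at h ⊢
  intro x hx
  simp only [Bool.not_eq_eq_eq_not, Bool.not_true]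
  exact isspace_not_pipe x (h x hx)

theorem strip_irrelevant (ct : List Char) :
    (splitP (· == '|') (PySem.Chars.strip ct)).flatMap procTok
      = (splitP (· == '|') ct).flatMap procTok := by
  have hws1 := all_takeWhile_isspace ct
  have hws2 := all_takeWhile_isspace (PySem.Chars.lstrip ct).reverse
  have hws2' : ((List.takeWhile PySem.Chars.isspace (PySem.Chars.lstrip ct).reverse).reverse).all PySem.Chars.isspace := by
    simp [hws2]
  have hct : ct = List.takeWhile PySem.Chars.isspace ct ++ PySem.Chars.lstrip ct := by
    unfold PySem.Chars.lstrip
    rw [List.takeWhile_append_dropWhile]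
  have hy : PySem.Chars.lstrip ct
      = PySem.Chars.strip ct
        ++ (List.takeWhile PySem.Chars.isspace (PySem.Chars.lstrip ct).reverse).reverse := by
    unfold PySem.Chars.strip PySem.Chars.rstrip
    conv_lhs => rw [← List.reverse_reverse (PySem.Chars.lstrip ct),
      ← List.takeWhile_append_dropWhile (p := PySem.Chars.isspace)
        (l := (PySem.Chars.lstrip ct).reverse)]
    rw [List.reverse_append]
  conv_rhs => rw [hct, splitP_ws_left _ _ _ (ws_not_pipe _ hws1),
    flatMap_modifyHead_ws _ hws1, hy,
    splitP_ws_right _ _ _ (ws_not_pipe _ hws2'), flatMap_mLast_ws _ hws2']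


def isSep (c : Char) : Bool := c == ',' || c == '|'

theorem go_invariant (cs : List Char) :
    ∀ (buf : List Char) (skip : Bool) (out : List String) (h : List Char) (t : List (List Char)),
    splitP isSep cs = h :: t →
    splitFieldGo cs buf skip out
      = out ++ emitTok (if skip then buf else buf ++ h.takeWhile (· != '('))
            ++ t.flatMap procTok := by
  induction cs with
  | nil =>
    intro buf skip out h t hsp
    simp only [splitP] at hsp
    obtain ⟨rfl, rfl⟩ : h = [] ∧ t = [] := by
      constructor <;> [exact (List.cons.injEq _ _ _ _ ▸ hsp).1.symm; exact (List.cons.injEq _ _ _ _ ▸ hsp).2.symm]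
    cases skip <;> simp [splitFieldGo, emitTok] <;> split <;> simp
  | cons c cs ih =>
    intro buf skip out h t hsp
    by_cases hsep : c = ',' ∨ c = '|'
    · have hps : isSep c = true := by
        rcases hsep with rfl | rfl <;> rfl
      simp only [splitP, hps, if_pos] at hsp
      obtain ⟨rfl, hts⟩ : h = [] ∧ splitP isSep cs = t := by
        exact ⟨((List.cons.injEq _ _ _ _).mp hsp).1.symm, ((List.cons.injEq _ _ _ _).mp hsp).2⟩
      obtain ⟨h', t', hsp'⟩ : ∃ h' t', splitP isSep cs = h' :: t' := by
        cases hh : splitP isSep cs with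
        | nil => exact absurd hh (splitP_ne_nil _ cs)
        | cons a u => exact ⟨a, u, rfl⟩
      rw [show splitFieldGo (c :: cs) buf skip out
          = splitFieldGo cs [] false
              (if PySem.Chars.strip buf ≠ [] then out ++ [String.ofList (PySem.Chars.strip buf)] else out) by
        simp [splitFieldGo, hsep]]
      rw [ih [] false _ h' t' hsp', ← hts, hsp']
      have hemit : (if PySem.Chars.strip buf ≠ [] then out ++ [String.ofList (PySem.Chars.strip buf)] else out)
          = out ++ emitTok buf := by
        unfold emitTok; split <;> simp
      rw [hemit]
      cases skip <;> simp [procTok, emitTok, List.flatMap_cons]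
    · have hps : isSep c = false := by
        simp only [isSep, Bool.or_eq_false_iff, beq_eq_false_iff_ne]
        exact ⟨fun hc => hsep (Or.inl hc), fun hc => hsep (Or.inr hc)⟩
      obtain ⟨h', t', hsp'⟩ : ∃ h' t', splitP isSep cs = h' :: t' := by
        cases hh : splitP isSep cs with
        | nil => exact absurd hh (splitP_ne_nil _ cs)
        | cons a u => exact ⟨a, u, rfl⟩
      simp only [splitP, hps, Bool.false_eq_true, hsp', List.modifyHead] at hsp
      obtain ⟨rfl, rfl⟩ : h = c :: h' ∧ t = t' :=
        ⟨((List.cons.injEq _ _ _ _).mp hsp).1.symm, ((List.cons.injEq _ _ _ _).mp hsp).2.symm⟩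
      by_cases hpar : c = '('
      · subst hpar
        rw [show splitFieldGo ('(' :: cs) buf skip out = splitFieldGo cs buf true out by
          simp [splitFieldGo]]
        rw [ih buf true out h' t hsp']
        cases skip <;> simp
      · cases skip with
        | true =>
          rw [show splitFieldGo (c :: cs) buf true out = splitFieldGo cs buf true out by
            simp [splitFieldGo, hsep, hpar]]
          rw [ih buf true out h' t hsp']
          simp
        | false =>
          rw [show splitFieldGo (c :: cs) buf false out = splitFieldGo cs (buf ++ [c]) false out by
            simp [splitFieldGo, hsep, hpar]]
          rw [ih (buf ++ [c]) false out h' t hsp']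
          have : (c :: h').takeWhile (· != '(') = c :: h'.takeWhile (· != '(') := by
            rw [List.takeWhile_cons, if_pos (by simp [hpar])]
          simp [this]

theorem portB_eq (s : String) :
    splitFieldGo s.toList [] false [] = (splitP isSep s.toList).flatMap procTok := by
  obtain ⟨h, t, hsp⟩ : ∃ h t, splitP isSep s.toList = h :: t := by
    cases hh : splitP isSep s.toList with
    | nil => exact absurd hh (splitP_ne_nil _ _)
    | cons a u => exact ⟨a, u, rfl⟩
  rw [go_invariant _ [] false [] h t hsp, hsp]
  simp [procTok]

theorem splitOn_go_single (c : Char) (l : List Char) :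
    ∀ (fuel : Nat) (cur : List Char) (acc : List (List Char)), l.length < fuel →
    PySem.Chars.splitOn.go [c] fuel l cur acc
      = acc.reverse ++ (splitP (· == c) l).modifyHead (cur.reverse ++ ·) := by
  induction l with
  | nil =>
    intro fuel cur acc hf
    obtain ⟨f, rfl⟩ : ∃ f, fuel = f + 1 := ⟨fuel - 1, by omega⟩
    rw [PySem.Chars.splitOn.go]
    · simp [splitP]
    · omega
  | cons x rest ih =>
    intro fuel cur acc hf
    obtain ⟨f, rfl⟩ : ∃ f, fuel = f + 1 := ⟨fuel - 1, by omega⟩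
    rw [PySem.Chars.splitOn.go]
    have hpre : [c].isPrefixOf (x :: rest) = (c == x) := by
      simp [List.isPrefixOf]
    by_cases hx : c = x
    · subst hx
      rw [hpre]
      simp only [beq_self_eq_true, if_pos, List.length_cons, List.drop_succ_cons]
      rw [show List.drop [].length rest = rest from rfl]
      rw [ih f [] (cur.reverse :: acc) (by simp at hf; omega)]
      obtain ⟨a, t, hs⟩ : ∃ a t, splitP (· == c) rest = a :: t := by
        cases hh : splitP (· == c) rest with
        | nil => exact absurd hh (splitP_ne_nil _ rest)
        | cons a t => exact ⟨a, t, rfl⟩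
      simp [splitP, hs]
    · rw [hpre]
      have : (c == x) = false := by simp [hx]
      rw [this]
      simp only [Bool.false_eq_true, if_neg, not_false_iff]
      rw [ih f (x :: cur) acc (by simp at hf ⊢; omega)]
      obtain ⟨a, t, hs⟩ : ∃ a t, splitP (· == c) rest = a :: t := by
        cases hh : splitP (· == c) rest with
        | nil => exact absurd hh (splitP_ne_nil _ rest)
        | cons a t => exact ⟨a, t, rfl⟩
      have hxc : (x == c) = false := by simp [Ne.symm hx]
      simp [splitP, hs, hxc]

theorem splitOn_single (c : Char) (l : List Char) :
    PySem.Chars.splitOn l [c] = splitP (· == c) l := by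
  unfold PySem.Chars.splitOn
  rw [splitOn_go_single c l (l.length + 1) [] [] (by omega)]
  obtain ⟨a, t, hs⟩ : ∃ a t, splitP (· == c) l = a :: t := by
    cases hh : splitP (· == c) l with
    | nil => exact absurd hh (splitP_ne_nil _ l)
    | cons a t => exact ⟨a, t, rfl⟩
  simp [hs]

theorem singleton_prefix_iff (a : Char) (l : List Char) : [a] <+: l ↔ l.head? = some a := by
  cases l with
  | nil => simp
  | cons x xs => simp [List.cons_prefix_cons, eq_comm]

theorem takeWhile_ne_eq_take (cs : List Char) (n : Nat)
    (hn : cs[n]? = some '(') (h1 : ∀ i < n, cs[i]? ≠ some '(') :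
    cs.takeWhile (· != '(') = cs.take n := by
  induction cs generalizing n with
  | nil => simp at hn
  | cons x xs ih =>
    cases n with
    | zero =>
      simp only [List.getElem?_cons_zero, Option.some_inj] at hn
      subst hn
      simp
    | succ k =>
      have hx : x ≠ '(' := by
        have := h1 0 (by omega)
        simpa using this
      rw [List.takeWhile_cons, if_pos (by simp [hx]), List.take_succ_cons]
      rw [ih k (by simpa using hn) (fun i hi => by simpa using h1 (i+1) (by omega))]

theorem trunc_eq_takeWhile (cs : List Char) :
    (if 0 ≤ PySem.Chars.find cs ['('] then
        PySem.Chars.slice cs none (some (PySem.Chars.find cs ['('])) else cs)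
      = cs.takeWhile (· != '(') := by
  by_cases hge : 0 ≤ PySem.Chars.find cs ['(']
  · rw [if_pos hge]
    obtain ⟨hpre, hmin⟩ := PySem.Chars.find_spec hge
    have hn : cs[(PySem.Chars.find cs ['(']).toNat]? = some '(' := by
      rw [← List.head?_drop]
      exact ((singleton_prefix_iff _ _).mp hpre)
    have h1 : ∀ i < (PySem.Chars.find cs ['(']).toNat, cs[i]? ≠ some '(' := by
      intro i hi hc
      exact hmin i hi ((singleton_prefix_iff _ _).mpr (by rw [List.head?_drop]; exact hc))
    rw [PySem.Chars.slice_eq_listSlice, PySem.List.slice_to cs hge,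
      takeWhile_ne_eq_take cs _ hn h1]
  · have hm1 : PySem.Chars.find cs ['('] = -1 := by
      have := PySem.Chars.neg_one_le_find cs ['(']
      omega
    have hnotmem : '(' ∉ cs := by
      intro hmem
      have : [Char.ofNat 40] <:+: cs := by
        obtain ⟨s, t, rfl⟩ := List.append_of_mem hmem
        exact ⟨s, t, by simp⟩
      rw [PySem.Chars.find_eq_neg_one_iff] at hm1
      exact hm1 this
    rw [if_neg hge, List.takeWhile_eq_self_iff.mpr]
    intro x hx
    simp only [bne_iff_ne, ne_eq]
    intro rfl_eq
    exact hnotmem (rfl_eq ▸ hx)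


theorem split_getD (t sep : String) (c : Char) (hc : sep.toList = [c]) :
    (PySem.Str.split? t sep).getD []
      = (splitP (· == c) t.toList).map String.ofList := by
  simp [PySem.Str.split?, PySem.Chars.split?, hc, splitOn_single]

theorem ofList_ne_empty_iff (x : List Char) : String.ofList x ≠ "" ↔ x ≠ [] := by
  constructor
  · intro h hx; exact h (by rw [hx])
  · intro h hx
    exact h (by have := congrArg String.toList hx; simpa using this)

theorem dis_body (acc : List String) (dt : List Char) :
    (let i := PySem.Str.find (String.ofList dt) "("
     let dis := if 0 ≤ i then PySem.Str.slice (String.ofList dt) none (some i) else String.ofList dt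
     let pkg := PySem.Str.strip dis
     if pkg ≠ "" then acc ++ [pkg] else acc) = acc ++ procTok dt := by
  have hfind : PySem.Str.find (String.ofList dt) "(" = PySem.Chars.find dt ['('] := by
    simp [PySem.Str.find]
  have hdis : (if 0 ≤ PySem.Str.find (String.ofList dt) "(" then
        PySem.Str.slice (String.ofList dt) none (some (PySem.Str.find (String.ofList dt) "(")) else String.ofList dt)
      = String.ofList (dt.takeWhile (· != '(')) := by
    rw [hfind, ← trunc_eq_takeWhile]
    split
    · simp [PySem.Str.slice]
    · simp
  simp only [hdis]
  have hstrip : PySem.Str.strip (String.ofList (dt.takeWhile (· != '(')))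
      = String.ofList (PySem.Chars.strip (dt.takeWhile (· != '('))) := by
    simp [PySem.Str.strip]
  rw [hstrip]
  unfold procTok emitTok
  by_cases hne : PySem.Chars.strip (dt.takeWhile (· != '(')) = []
  · rw [if_neg (by simp [hne]), if_neg (by simp [hne])]
    simp
  · rw [if_pos ((ofList_ne_empty_iff _).mpr hne), if_pos hne]

theorem con_body (acc : List String) (con : String) :
    ((PySem.Str.split? (PySem.Str.strip con) "|").getD []).foldl (fun acc dis =>
        let i := PySem.Str.find dis "("
        let dis := if 0 ≤ i then PySem.Str.slice dis none (some i) else dis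
        let pkg := PySem.Str.strip dis
        if pkg ≠ "" then acc ++ [pkg] else acc) acc
      = acc ++ (splitP (· == '|') (PySem.Chars.strip con.toList)).flatMap procTok := by
  rw [split_getD (PySem.Str.strip con) "|" '|' rfl]
  rw [show (PySem.Str.strip con).toList = PySem.Chars.strip con.toList from PySem.Str.toList_strip con]
  rw [List.foldl_map]
  have : ∀ acc dt, (fun (acc : List String) dis =>
      let i := PySem.Str.find dis "("
      let dis := if 0 ≤ i then PySem.Str.slice dis none (some i) else dis
      let pkg := PySem.Str.strip dis
      if pkg ≠ "" then acc ++ [pkg] else acc) acc (String.ofList dt) = acc ++ procTok dt := by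
    intro acc dt; exact dis_body acc dt
  simp only [this]
  exact PySem.List.foldl_append_eq_flatMap procTok _ acc

theorem portA_eq (s : String) :
    split_field_py s
      = (splitP (· == ',') s.toList).flatMap
          (fun ct => (splitP (· == '|') (PySem.Chars.strip ct)).flatMap procTok) := by
  unfold split_field_py
  rw [split_getD s "," ',' rfl, List.foldl_map]
  have : ∀ (acc : List String) (ct : List Char), (fun (acc : List String) con =>
      let con := PySem.Str.strip con
      ((PySem.Str.split? con "|").getD []).foldl (fun acc dis =>
        let i := PySem.Str.find dis "("
        let dis := if 0 ≤ i then PySem.Str.slice dis none (some i) else dis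
        let pkg := PySem.Str.strip dis
        if pkg ≠ "" then acc ++ [pkg] else acc) acc) acc (String.ofList ct)
      = acc ++ (splitP (· == '|') (PySem.Chars.strip ct)).flatMap procTok := by
    intro acc ct
    have := con_body acc (String.ofList ct)
    simpa using this
  simp only [this]
  exact PySem.List.foldl_append_eq_flatMap _ _ []

theorem portB_eq' (s : String) :
    split_field_py_alt s = (splitP isSep s.toList).flatMap procTok := portB_eq s

-- ===== VERDICT (by name: the statement is the Claim_ definition above) =====
theorem split_field_py_spec : Claim_equal_split_field_py := by
  intro s _
  unfold Spec_split_field_py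
  rw [portA_eq, portB_eq']
  have h1 : ∀ ct, (splitP (· == '|') (PySem.Chars.strip ct)).flatMap procTok
      = (splitP (· == '|') ct).flatMap procTok := strip_irrelevant
  simp only [h1]
  have h2 : isSep = fun c => (c == ',') || (c == '|') := rfl
  rw [h2, ← splitP_flatten, List.flatMap_assoc]
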